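-- pv_equiv track=rewrite | github.com/kadragon/oop_python_ex | student_result/2019/01_number_baseball/baseball [2-5 이C].py | number_test
-- ===== SOURCE A (Python) =====
-- def number_test(num):
--     """
--     입력받은 숫자가 범위 안에 있는지 판단하는 함수이다.
--     :return: True or False
--     """
--     if len(num) != 3:  # 숫자의 길이는 3개로 제한함.
--         return False
--
--     try:
--         for i in num:
--             if int(i) not in list(range(0, 10)):
--                 return False
--     except ValueError:  # 입력받은 값이 숫자가 아니어서 오류가 뜬다면 예외로 처리하고 false 로 리턴한다.
--         return False
--
--     for i in range(3):
--         for j in range(3):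
--             if i != j and num[i] == num[j]:
--                 return False  # 만약 중복되는 숫자를 입력받았다면 다시 입력해야 한다.
--
--     return True  # 모든 조건을 만족하면 True 로 리턴.
-- ===== SOURCE B (Python) =====
-- def number_test(num):
--     # Simpler: direct digit-membership test and a set-cardinality distinctness check
--     # instead of try/int() validation and a 3x3 nested positional comparison.
--     return len(num) == 3 and all(c in "0123456789" for c in num) and len(set(num)) == 3
-- ===== Notes on version B (the rewrite author's own statement) =====
-- stated objective: simpler
-- what changed: Replaces the try/int()-per-character validation and the 3x3 nested positional comparison with one conjunction: per-character membership in the decimal-digit string and a set-cardinality distinctness check (len(set(num)) == 3).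
import Mathlib
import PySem

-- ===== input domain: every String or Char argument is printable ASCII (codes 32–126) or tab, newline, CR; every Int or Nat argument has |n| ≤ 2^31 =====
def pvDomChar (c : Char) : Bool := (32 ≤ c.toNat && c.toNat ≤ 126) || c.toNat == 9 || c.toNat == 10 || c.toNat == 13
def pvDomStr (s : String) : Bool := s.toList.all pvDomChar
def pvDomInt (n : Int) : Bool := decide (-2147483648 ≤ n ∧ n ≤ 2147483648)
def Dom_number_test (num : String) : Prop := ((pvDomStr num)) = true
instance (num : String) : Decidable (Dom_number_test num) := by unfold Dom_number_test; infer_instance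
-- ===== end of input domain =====

-- B replaces A's try/int() per-char validation and 3x3 nested duplicate scan with a
-- digit-membership test plus a set-cardinality check (objective: simpler).


-- ===== PORT A =====
-- the try-block: for each char i, int(i) raising ValueError returns False (except-branch);
-- int(i) not in list(range(0,10)) returns False; otherwise continue the loop
def ntTryLoop : List Char → Bool
  | [] => true
  | c :: rest =>
    match PySem.Int.ofChars? [c] with      -- int(i); none = ValueError
    | none => false
    | some v => if !((PySem.List.pyRange 0 10 1).contains v) then false else ntTryLoop rest

def number_test (num : String) : Bool :=
  if PySem.Str.len num ≠ 3 then false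
  else if !ntTryLoop num.toList then false
  else if !((PySem.List.pyRange 0 3 1).all fun i =>
              (PySem.List.pyRange 0 3 1).all fun j =>
                !(decide (i ≠ j) && (PySem.List.pyGetD num.toList i ' ' ==
                                      PySem.List.pyGetD num.toList j ' '))) then false
  else true

-- ===== PORT B =====
def number_test_alt (num : String) : Bool :=
  PySem.Str.len num == 3 &&
  -- all(c in "0123456789" for c in num): single-char membership in an ASCII string = list membership
  num.toList.all (fun c => ("0123456789".toList).contains c) &&
  -- len(set(num)) == 3
  PySem.List.len (PySem.Set.ofList num.toList) == 3

-- ===== PRECONDITION & SPEC =====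
def Spec_number_test (num : String) (out : Bool) : Prop := out = number_test_alt num
instance (num : String) (out : Bool) : Decidable (Spec_number_test num out) := by unfold Spec_number_test; infer_instance

-- ===== CLAIM (what is proved, stated in full; the proofs are below) =====
def Claim_equal_number_test : Prop := ∀ (num : String), Dom_number_test num → Spec_number_test num (number_test num)

-- ===== LEMMAS AND PROOFS =====

-- all printable-ASCII/tab/newline/CR characters, as a literal list for case enumeration
def pvAsciiChars : List Char :=
  (" !\"#$%&'()*+,-./0123456789:;<=>?@ABCDEFGHIJKLMNOPQRSTUVWXYZ[\\]^_`abcdefghijklmnopqrstuvwxyz{|}~\t\n\r").toList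

lemma mem_pvAsciiChars (c : Char) (h : pvDomChar c = true) : c ∈ pvAsciiChars := by
  have hlt : c.toNat < 128 := by
    simp [pvDomChar] at h; omega
  have key : ∀ n ∈ List.range 128, pvDomChar (Char.ofNat n) = true → Char.ofNat n ∈ pvAsciiChars := by
    set_option maxRecDepth 100000 in decide
  have := key c.toNat (List.mem_range.mpr hlt)
  rw [Char.ofNat_toNat] at this
  exact this h

-- on domain characters, A's per-character int()+range test agrees with digit membership
lemma step_eq (c : Char) (h : pvDomChar c = true) :
    (match PySem.Int.ofChars? [c] with
     | none => false
     | some v => (PySem.List.pyRange 0 10 1).contains v) = ("0123456789".toList).contains c := by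
  have hm := mem_pvAsciiChars c h
  have key : pvAsciiChars.all (fun x =>
      ((match PySem.Int.ofChars? [x] with
        | none => false
        | some v => (PySem.List.pyRange 0 10 1).contains v) == ("0123456789".toList).contains x)) = true := by
    set_option maxRecDepth 100000 in decide
  simpa using List.all_eq_true.mp key c hm

-- boolean shape of A's early-return test
lemma pv_if_not (x y : Bool) : (if (!x) = true then false else y) = (x && y) := by
  cases x <;> simp

-- A's per-character loop step, rewritten through step_eq
lemma ntTryLoop_cons (c : Char) (rest : List Char) (h : pvDomChar c = true) :
    ntTryLoop (c :: rest) = (("0123456789".toList).contains c && ntTryLoop rest) := by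
  cases hoc : PySem.Int.ofChars? [c] with
  | none =>
    have hs0 : ("0123456789".toList).contains c = false := by
      have := step_eq c h; rw [hoc] at this; exact this.symm
    conv_lhs => unfold ntTryLoop
    rw [hoc, hs0]
    simp
  | some v =>
    have hs : (PySem.List.pyRange 0 10 1).contains v = ("0123456789".toList).contains c := by
      have := step_eq c h; rw [hoc] at this; exact this
    conv_lhs => unfold ntTryLoop
    rw [hoc]
    show (if (!(PySem.List.pyRange 0 10 1).contains v) = true then false else ntTryLoop rest) = _
    rw [← hs, pv_if_not]

-- ===== VERDICT (by name: the statement is the Claim_ definition above) =====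
set_option maxHeartbeats 800000 in
theorem number_test_spec : Claim_equal_number_test := by
  intro num hdom
  unfold Spec_number_test number_test number_test_alt
  have hall : ∀ x ∈ num.toList, pvDomChar x = true := by
    simpa [Dom_number_test, pvDomStr, List.all_eq_true] using hdom
  by_cases h3 : num.toList.length = 3
  · obtain ⟨a, b, c, hcs⟩ := List.length_eq_three.mp h3
    have ha := hall a (by rw [hcs]; simp)
    have hb := hall b (by rw [hcs]; simp)
    have hc := hall c (by rw [hcs]; simp)
    have hr3 : PySem.List.pyRange 0 3 1 = [0, 1, 2] := by decide
    have g0 : PySem.List.pyGetD [a, b, c] 0 ' ' = a := by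
      simp [PySem.List.pyGetD, PySem.List.pyGet?, PySem.List.pyIdx?]
    have g1 : PySem.List.pyGetD [a, b, c] 1 ' ' = b := by
      simp [PySem.List.pyGetD, PySem.List.pyGet?, PySem.List.pyIdx?]
    have g2 : PySem.List.pyGetD [a, b, c] 2 ' ' = c := by
      simp [PySem.List.pyGetD, PySem.List.pyGet?, PySem.List.pyIdx?]
    rw [PySem.Str.len_eq, hcs]
    rw [ntTryLoop_cons a _ ha, ntTryLoop_cons b _ hb, ntTryLoop_cons c _ hc]
    simp only [hr3, List.all_cons, List.all_nil, g0, g1, g2,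
               List.length_cons, List.length_nil, ntTryLoop]
    by_cases hba : b = a <;> by_cases hca : c = a <;> by_cases hcb : c = b <;>
      simp_all [PySem.Set.ofList, PySem.Set.add, PySem.List.len]
    exact fun _ _ _ => ⟨⟨fun h => hba h.symm, fun h => hca h.symm⟩, fun h => hcb h.symm⟩
  · have hne' : (num.length : Int) ≠ 3 := by rw [← String.length_toList]; exact_mod_cast h3
    simp [PySem.Str.len_eq, hne']
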